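-- pv_equiv track=rewrite | github.com/swang0222/Algorithms-projects | Scheduling.py | myLPT
-- ===== SOURCE A (Python) =====
-- from typing import List, Tuple
--
-- def myLPT(P, m):
--
--     '''
--
--     Implement LPT function under here and return the optimal schedule.
--
--     Input:
--     List P: A list of processing time of jobs J_1 ,...., J_n
--     int m: number of parallel and identical processors
--
--     return:
--     List[List[Tuple[int, int]] sol: The optimal schedule for each job on each processor.
--         The i-th index of the outermost list must contain the schedule of jobs for the (i+1)-th processor.
--         (Since processors start from 1 and list indices start from 0).
--         Each pair inside this schedule must contain the following:
--             1. index of job (job index starts at 1 NOT 0!) - int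
--             2. completion time of the job on that respective processor - int
--
--             Note:  the start time of job J_j is the completion time of job J_j−1 on processor Pi.
--                   The start time for the first job on each processor is always 0.
--
--     '''
--     n = len(P)
--
--     IDs = list()
--     for i in range(n):
--         IDs.append((P[i], i + 1))
--
--
--     IDs.sort(key=lambda x: (-x[0], x[1]))
--
--     result: List[List[Tuple[int, int]]] = [[] for _ in range(m)]
--
--     row_sums = [0] * m
--
--     for i in range(len(P)):
--         min_sum = min(row_sums)
--         min_index = row_sums.index(min_sum)
--         result[min_index].append((IDs[i][1], min_sum + IDs[i][0]))
--         row_sums[min_index] += IDs[i][0]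
--
--     return result
-- ===== SOURCE B (Python) =====
-- def myLPT(P, m):
--     # Keep an ascending-sorted priority queue of (load, processor) pairs instead of
--     # rescanning all processor loads for the minimum at every job.
--     jobs = sorted(((P[i], i + 1) for i in range(len(P))), key=lambda x: (-x[0], x[1]))
--     buckets = [[] for _ in range(m)]
--     pq = [(0, k) for k in range(m)]
--     for p, j in jobs:
--         load, k = pq.pop(0)
--         done = load + p
--         buckets[k].append((j, done))
--         i = 0
--         while i < len(pq) and pq[i] < (done, k):
--             i += 1
--         pq.insert(i, (done, k))
--     return buckets
-- ===== Notes on version B (the rewrite author's own statement) =====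
-- stated objective: alternative
-- what changed: B keeps the processor loads in an ascending-sorted priority queue of (load, processor) pairs, popping the head and reinserting the updated pair, instead of A's per-job rescan of row_sums with min() followed by .index().
import Mathlib
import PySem

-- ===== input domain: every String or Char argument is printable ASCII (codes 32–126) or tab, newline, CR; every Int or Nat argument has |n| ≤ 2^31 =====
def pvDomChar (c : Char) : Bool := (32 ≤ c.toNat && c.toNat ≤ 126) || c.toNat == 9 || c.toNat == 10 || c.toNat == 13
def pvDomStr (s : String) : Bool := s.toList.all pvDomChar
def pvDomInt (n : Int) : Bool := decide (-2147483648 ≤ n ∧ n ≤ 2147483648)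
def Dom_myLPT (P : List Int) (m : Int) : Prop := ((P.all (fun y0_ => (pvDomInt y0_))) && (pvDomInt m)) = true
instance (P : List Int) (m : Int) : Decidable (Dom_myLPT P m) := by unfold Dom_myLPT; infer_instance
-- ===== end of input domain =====

-- B replaces A's per-job rescan of all processor loads (min + .index) by an
-- ascending-sorted priority queue of (load, processor) pairs; return values agree.

-- ===== PORT A =====
-- literal transliteration of A: build (time, id) pairs, sort by (-time, id),
-- then for each job scan row_sums for its minimum and that minimum's first index.
-- min()/ .index() are total here via .getD 0; under Pre_ they are always `some`.
def myLPT (P : List Int) (m : Int) : List (List (Int × Int)) :=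
  let IDs : List (Int × Int) :=
    (List.range P.length).foldl (fun acc i => acc ++ [(P.getD i 0, (i : Int) + 1)]) []
  let IDs := PySem.List.sorted2 IDs (fun x => -x.1) (fun x => x.2)
  let result : List (List (Int × Int)) := List.replicate m.toNat []
  let rowSums : List Int := List.replicate m.toNat 0
  ((List.range P.length).foldl
    (fun (st : List (List (Int × Int)) × List Int) i =>
      let minSum := (PySem.List.min? st.2 (fun x => x)).getD 0
      let minIndex := (PySem.List.index? st.2 minSum).getD 0
      let job := IDs.getD i (0, 0)
      (st.1.modify minIndex (fun l => l ++ [(job.2, minSum + job.1)]),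
       st.2.set minIndex (st.2.getD minIndex 0 + job.1)))
    (result, rowSums)).1

-- ===== PORT B =====
-- Python tuple '<' on (load, index) pairs, and the linear insertion of B's while loop.
def pqLt (a b : Int × Int) : Bool := a.1 < b.1 || (a.1 == b.1 && a.2 < b.2)

def pqInsert (x : Int × Int) : List (Int × Int) → List (Int × Int)
  | [] => [x]
  | y :: ys => if pqLt y x then y :: pqInsert x ys else x :: y :: ys

-- literal transliteration of B (Source B): sorted job list, then a sorted priority
-- queue pq of (load, processor): pop the head, insert the updated pair back.
-- pq.pop(0) on an empty pq is Python's IndexError: unreachable under Pre_ (state kept).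
def myLPT_alt (P : List Int) (m : Int) : List (List (Int × Int)) :=
  let jobs := PySem.List.sorted2
    ((List.range P.length).map (fun i => (P.getD i 0, (i : Int) + 1)))
    (fun x => -x.1) (fun x => x.2)
  let buckets : List (List (Int × Int)) := List.replicate m.toNat []
  let pq : List (Int × Int) := (List.range m.toNat).map (fun (k : Nat) => ((0 : Int), (k : Int)))
  (jobs.foldl
    (fun (st : List (List (Int × Int)) × List (Int × Int)) pj =>
      match st.2 with
      | [] => st
      | (load, k) :: rest =>
        let done := load + pj.1
        (st.1.modify k.toNat (fun l => l ++ [(pj.2, done)]),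
         pqInsert (done, k) rest))
    (buckets, pq)).1

-- ===== PRECONDITION & SPEC =====
-- A raises ValueError (min of an empty sequence) when P ≠ [] and m ≤ 0; B raises there too.
def Pre_myLPT (P : List Int) (m : Int) : Prop := P = [] ∨ 1 ≤ m
instance (P : List Int) (m : Int) : Decidable (Pre_myLPT P m) := by unfold Pre_myLPT; infer_instance
def pvWitness_myLPT : List Int × Int := ([3, 1, 2, 2], 2)

def Spec_myLPT (P : List Int) (m : Int) (out : List (List (Int × Int))) : Prop := out = myLPT_alt P m
instance (P : List Int) (m : Int) (out : List (List (Int × Int))) : Decidable (Spec_myLPT P m out) := by unfold Spec_myLPT; infer_instance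

-- ===== CLAIM (what is proved, stated in full; the proofs are below) =====
def Claim_equal_myLPT : Prop := ∀ (P : List Int) (m : Int), Dom_myLPT P m → Pre_myLPT P m → Spec_myLPT P m (myLPT P m)

-- ===== LEMMAS AND PROOFS =====

-- lexicographic strict order on (load, index) pairs, as a Prop
def lexLt (a b : Int × Int) : Prop := a.1 < b.1 ∨ (a.1 = b.1 ∧ a.2 < b.2)

-- the multiset of (load, processor) pairs that B's pq tracks for A's row_sums
def pairsOf (rs : List Int) : List (Int × Int) :=
  (List.range rs.length).map (fun k => (rs.getD k 0, (k : Int)))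

theorem mem_pairsOf {rs : List Int} {y : Int × Int} :
    y ∈ pairsOf rs ↔ ∃ k : Nat, k < rs.length ∧ y = (rs.getD k 0, (k : Int)) := by
  simp [pairsOf, List.mem_map, List.mem_range, eq_comm]

theorem pqLt_iff {a b : Int × Int} : pqLt a b = true ↔ lexLt a b := by
  simp [pqLt, lexLt]

theorem pqInsert_perm (x : Int × Int) (ys : List (Int × Int)) :
    (pqInsert x ys).Perm (x :: ys) := by
  induction ys with
  | nil => simp [pqInsert]
  | cons y ys ih =>
    simp only [pqInsert]
    split
    · exact (ih.cons y).trans (List.Perm.swap x y ys)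
    · exact List.Perm.refl _

theorem pqInsert_pairwise (x : Int × Int) (ys : List (Int × Int))
    (hs : ys.Pairwise lexLt) (hne : ∀ y ∈ ys, y ≠ x) :
    (pqInsert x ys).Pairwise lexLt := by
  induction ys with
  | nil => simp [pqInsert]
  | cons y ys ih =>
    rcases List.pairwise_cons.mp hs with ⟨hy, hys⟩
    simp only [pqInsert]
    split
    · rename_i h
      refine List.pairwise_cons.mpr ⟨?_, ih hys (fun z hz => hne z (List.mem_cons_of_mem _ hz))⟩
      intro z hz
      have hz' := (pqInsert_perm x ys).mem_iff.mp hz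
      rcases List.mem_cons.mp hz' with rfl | hz''
      · exact pqLt_iff.mp h
      · exact hy z hz''
    · rename_i h
      have hxy : lexLt x y := by
        have h1 : ¬ lexLt y x := fun hc => h (pqLt_iff.mpr hc)
        have h2 : y ≠ x := hne y (List.mem_cons_self ..)
        rcases lt_trichotomy y.1 x.1 with h3 | h3 | h3
        · exact absurd (Or.inl h3) h1
        · rcases lt_trichotomy y.2 x.2 with h4 | h4 | h4
          · exact absurd (Or.inr ⟨h3, h4⟩) h1
          · exact absurd (Prod.ext h3 h4) h2
          · exact Or.inr ⟨h3.symm, h4⟩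
        · exact Or.inl h3
      refine List.pairwise_cons.mpr ⟨?_, hs⟩
      intro z hz
      rcases List.mem_cons.mp hz with rfl | hz'
      · exact hxy
      · rcases hxy with h5 | h5
        · rcases hy z hz' with h6 | h6
          · exact Or.inl (h5.trans h6)
          · exact Or.inl (h6.1 ▸ h5)
        · rcases hy z hz' with h6 | h6
          · exact Or.inl (h5.1 ▸ h6)
          · exact Or.inr ⟨h5.1.trans h6.1, h5.2.trans h6.2⟩

-- fold over range(len xs) reading xs[i] is a fold over xs
theorem foldl_range_getD {α β : Type} (g : β → α → β) (d : α) :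
    ∀ (xs : List α) (init : β),
      (List.range xs.length).foldl (fun st i => g st (xs.getD i d)) init = xs.foldl g init := by
  intro xs
  induction xs with
  | nil => intro init; simp
  | cons x t ih =>
    intro init
    simp only [List.length_cons, List.range_succ_eq_map, List.foldl_cons, List.foldl_map,
      List.getD_cons_zero, List.getD_cons_succ]
    exact ih (g init x)

-- the head of the sorted pq names A's min and its first index
theorem head_pq_min {rs : List Int} {l k : Int} {rest : List (Int × Int)}
    (hs : ((l, k) :: rest).Pairwise lexLt)
    (hp : ((l, k) :: rest).Perm (pairsOf rs)) :
    ∃ k0 : Nat, k = (k0 : Int) ∧ k0 < rs.length ∧ rs.getD k0 0 = l ∧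
      PySem.List.min? rs (fun x => x) = some l ∧ PySem.List.index? rs l = some k0 := by
  have hmem : (l, k) ∈ pairsOf rs := hp.subset (List.mem_cons_self ..)
  obtain ⟨k0, hk0, heq⟩ := mem_pairsOf.mp hmem
  have hl : rs.getD k0 0 = l := (congrArg Prod.fst heq).symm
  have hk : k = (k0 : Int) := congrArg Prod.snd heq
  have hhead : ∀ y ∈ pairsOf rs, y = (l, k) ∨ lexLt (l, k) y := by
    intro y hy
    rcases List.mem_cons.mp (hp.symm.subset hy) with rfl | hy'
    · exact Or.inl rfl
    · exact Or.inr ((List.pairwise_cons.mp hs).1 y hy')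
  have hmin : ∀ j, j < rs.length → l ≤ rs.getD j 0 := by
    intro j hj
    rcases hhead (rs.getD j 0, (j : Int)) (mem_pairsOf.mpr ⟨j, hj, rfl⟩) with h | h | h
    · have h' : rs.getD j 0 = l := by simpa using congrArg Prod.fst h
      exact le_of_eq h'.symm
    · exact le_of_lt h
    · exact le_of_eq h.1
  have hfirst : ∀ j, j < rs.length → rs.getD j 0 = l → k0 ≤ j := by
    intro j hj hjl
    rcases hhead (rs.getD j 0, (j : Int)) (mem_pairsOf.mpr ⟨j, hj, rfl⟩) with h | h | h
    · have h2 : (j : Int) = k := congrArg Prod.snd h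
      omega
    · rw [hjl] at h; exact absurd h (lt_irrefl _)
    · have h2 : k < (j : Int) := h.2
      omega
  refine ⟨k0, hk, hk0, hl, ?_, ?_⟩
  · cases hmv : PySem.List.min? rs (fun x => x) with
    | none =>
      have : rs = [] := (PySem.List.min?_eq_none_iff rs _).mp hmv
      subst this; simp at hk0
    | some mv =>
      have hmvmem := PySem.List.min?_mem hmv
      obtain ⟨j, hj, hje⟩ := List.mem_iff_getElem.mp hmvmem
      have h1 : l ≤ mv := by
        have := hmin j hj
        rwa [List.getD_eq_getElem _ _ hj, hje] at this
      have h2 : mv ≤ l := by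
        have hlm : l ∈ rs := by
          rw [← hl, List.getD_eq_getElem _ _ hk0]; exact List.getElem_mem hk0
        exact PySem.List.min?_isMin hmv l hlm
      rw [le_antisymm h2 h1]
  · refine (PySem.List.index?_eq_some_iff rs l k0).mpr
      ⟨rs.take k0, rs.drop (k0 + 1), ?_, ?_, ?_⟩
    · conv_lhs => rw [← List.take_append_drop k0 rs, ← List.getElem_cons_drop hk0]
      rw [← hl, List.getD_eq_getElem _ _ hk0]
    · simp [List.length_take]; omega
    · intro hcontra
      rw [List.mem_take_iff_getElem] at hcontra
      obtain ⟨j, hjlt, hje⟩ := hcontra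
      have hj : j < rs.length := lt_of_lt_of_le hjlt (min_le_right _ _)
      have : k0 ≤ j := hfirst j hj (by rw [List.getD_eq_getElem _ _ hj, hje])
      omega

-- pairsOf after updating one load is a pointwise set
theorem pairsOf_set {rs : List Int} {k0 : Nat} (v : Int) (_hk0 : k0 < rs.length) :
    pairsOf (rs.set k0 v) = (pairsOf rs).set k0 (v, (k0 : Int)) := by
  apply List.ext_getElem
  · simp [pairsOf]
  · intro j h1 h2
    have hj : j < rs.length := by simpa [pairsOf] using h2
    simp only [pairsOf, List.getElem_set, List.getElem_map, List.getElem_range]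
    by_cases hcase : k0 = j
    · subst hcase
      rw [if_pos rfl, List.getD_eq_getElem _ _ (show k0 < (rs.set k0 v).length by simpa using hj)]
      simp
    · rw [if_neg hcase,
        List.getD_eq_getElem _ _ (show j < (rs.set k0 v).length by simpa using hj),
        List.getD_eq_getElem _ _ hj, List.getElem_set_ne hcase]

-- perm transport of one step: popping the head and reinserting the updated pair
theorem step_perm {rs : List Int} {l k : Int} {rest : List (Int × Int)} {k0 : Nat} (p : Int)
    (hk : k = (k0 : Int)) (hk0 : k0 < rs.length) (hl : rs.getD k0 0 = l)
    (hp : ((l, k) :: rest).Perm (pairsOf rs)) :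
    (pqInsert (l + p, k) rest).Perm (pairsOf (rs.set k0 (l + p))) := by
  have hklen : k0 < (pairsOf rs).length := by simpa [pairsOf] using hk0
  have hget : (pairsOf rs)[k0] = (l, k) := by
    simp only [pairsOf, List.getElem_map, List.getElem_range]
    rw [hl, hk]
  have h1 : pairsOf rs = (pairsOf rs).take k0 ++ (l, k) :: (pairsOf rs).drop (k0 + 1) := by
    conv_lhs => rw [← List.take_append_drop k0 (pairsOf rs),
      ← List.getElem_cons_drop hklen]
    rw [hget]
  have h2 : pairsOf (rs.set k0 (l + p)) =
      (pairsOf rs).take k0 ++ (l + p, k) :: (pairsOf rs).drop (k0 + 1) := by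
    rw [pairsOf_set (l + p) hk0, List.set_eq_take_append_cons_drop, if_pos hklen, hk]
  have hrest : rest.Perm ((pairsOf rs).take k0 ++ (pairsOf rs).drop (k0 + 1)) := by
    have hmid : (pairsOf rs).Perm
        ((l, k) :: ((pairsOf rs).take k0 ++ (pairsOf rs).drop (k0 + 1))) := by
      conv_lhs => rw [h1]
      exact List.perm_middle
    exact (hp.trans hmid).cons_inv
  refine ((pqInsert_perm _ _).trans (hrest.cons _)).trans ?_
  rw [h2]
  exact List.perm_middle.symm

theorem rest_ne {rs : List Int} {l k : Int} {rest : List (Int × Int)} {k0 : Nat} (p : Int)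
    (hs : ((l, k) :: rest).Pairwise lexLt)
    (hk : k = (k0 : Int)) (_hk0 : k0 < rs.length) (hl : rs.getD k0 0 = l)
    (hp : ((l, k) :: rest).Perm (pairsOf rs)) :
    ∀ y ∈ rest, y ≠ (l + p, k) := by
  intro y hy hcontra
  obtain ⟨j, hj, hyeq⟩ := mem_pairsOf.mp (hp.subset (List.mem_cons_of_mem _ hy))
  have hjk : (j : Int) = k := by rw [hyeq] at hcontra; exact congrArg Prod.snd hcontra
  have hjeq : j = k0 := by omega
  have hyl : y = (l, k) := by rw [hyeq, hjeq, hl, ← hk]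
  have := (List.pairwise_cons.mp hs).1 y hy
  rw [hyl] at this
  rcases this with h | h
  · exact absurd h (lt_irrefl _)
  · exact absurd h.2 (lt_irrefl _)

-- main loop invariant: identical buckets, pq in sync with row_sums
theorem loop_eq (jobs : List (Int × Int)) :
    ∀ (buckets : List (List (Int × Int))) (rs : List Int) (pq : List (Int × Int)),
      rs ≠ [] → pq.Pairwise lexLt → pq.Perm (pairsOf rs) →
      (jobs.foldl
        (fun (st : List (List (Int × Int)) × List Int) job =>
          let minSum := (PySem.List.min? st.2 (fun x => x)).getD 0
          let minIndex := (PySem.List.index? st.2 minSum).getD 0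
          (st.1.modify minIndex (fun l => l ++ [(job.2, minSum + job.1)]),
           st.2.set minIndex (st.2.getD minIndex 0 + job.1)))
        (buckets, rs)).1
      =
      (jobs.foldl
        (fun (st : List (List (Int × Int)) × List (Int × Int)) pj =>
          match st.2 with
          | [] => st
          | (load, k) :: rest =>
            let done := load + pj.1
            (st.1.modify k.toNat (fun l => l ++ [(pj.2, done)]),
             pqInsert (done, k) rest))
        (buckets, pq)).1 := by
  induction jobs with
  | nil => intro buckets rs pq _ _ _; rfl
  | cons pj t ih =>
    intro buckets rs pq hne hs hp
    match pq with
    | [] =>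
      have : (pairsOf rs).length = 0 := by simpa using hp.symm.length_eq
      have : rs.length = 0 := by simpa [pairsOf] using this
      exact absurd (List.length_eq_zero_iff.mp this) hne
    | (load, k) :: rest =>
      obtain ⟨k0, hk, hk0, hl, hmin, hidx⟩ := head_pq_min hs hp
      subst hk
      simp only [List.foldl_cons, hmin, hidx, Option.getD_some, hl, Int.toNat_natCast]
      exact ih _ _ _
        (by intro hc
            have h0 : rs.length = 0 := by simpa using congrArg List.length hc
            omega)
        (pqInsert_pairwise _ _ (List.pairwise_cons.mp hs).2 (rest_ne pj.1 hs rfl hk0 hl hp))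
        (step_perm pj.1 rfl hk0 hl hp)

-- ===== VERDICT (by name: the statement is the Claim_ definition above) =====
theorem myLPT_spec : Claim_equal_myLPT := by
  intro P m _ hpre
  unfold Spec_myLPT myLPT myLPT_alt
  rcases hpre with rfl | hm
  · rfl
  · simp only [PySem.List.foldl_append_singleton_eq_map, List.nil_append]
    set jobs := PySem.List.sorted2
      ((List.range P.length).map (fun i => (P.getD i 0, (i : Int) + 1)))
      (fun x => -x.1) (fun x => x.2) with hjobs
    have hlen : jobs.length = P.length := by
      rw [hjobs, (PySem.List.sorted2_perm _ _ _ _).length_eq]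
      simp
    rw [← hlen]
    have hm1 : 1 ≤ m.toNat := by omega
    refine (congrArg Prod.fst (foldl_range_getD
      (fun (st : List (List (Int × Int)) × List Int) (job : Int × Int) =>
        let minSum := (PySem.List.min? st.2 (fun x => x)).getD 0
        let minIndex := (PySem.List.index? st.2 minSum).getD 0
        (st.1.modify minIndex (fun l => l ++ [(job.2, minSum + job.1)]),
         st.2.set minIndex (st.2.getD minIndex 0 + job.1)))
      ((0 : Int), (0 : Int)) jobs
      (List.replicate m.toNat [], List.replicate m.toNat (0 : Int)))).trans
      (loop_eq jobs _ _ _ ?_ ?_ ?_)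
    · intro hc
      have h0 : (List.replicate m.toNat (0 : Int)).length = 0 := by rw [hc]; rfl
      rw [List.length_replicate] at h0
      omega
    · refine List.pairwise_map.mpr (List.Pairwise.imp ?_ List.pairwise_lt_range)
      intro a b hab
      exact Or.inr ⟨rfl, by show (a : Int) < (b : Int); exact_mod_cast hab⟩
    · have hpq : pairsOf (List.replicate m.toNat (0 : Int)) =
          (List.range m.toNat).map (fun (k : Nat) => ((0 : Int), (k : Int))) := by
        unfold pairsOf
        rw [List.length_replicate]
        apply List.map_congr_left
        intro k hk
        rw [List.getD_replicate (h := List.mem_range.mp hk)]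
      rw [← hpq]
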